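-- pv_equiv track=rewrite | github.com/vigo999/mindspore-skills | skills/readiness-agent/scripts/build_readiness_report.py | derive_evidence_level
-- ===== SOURCE A (Python) =====
-- from typing import List, Optional, Set, Tuple
--
-- def derive_evidence_level(checks: List[dict]) -> str:
--     ok_ids = {
--         str(item.get("id"))
--         for item in checks
--         if (item.get("status") or "").strip().lower() == "ok"
--     }
--
--     if "task-smoke-executed" in ok_ids:
--         return "task_smoke"
--     if "framework-smoke-prerequisite" in ok_ids:
--         return "runtime_smoke"
--     if "framework-importability" in ok_ids:
--         return "import"
--     return "structural"
-- ===== SOURCE B (Python) =====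
-- def derive_evidence_level(checks):
--     priorities = [
--         ("task-smoke-executed", "task_smoke"),
--         ("framework-smoke-prerequisite", "runtime_smoke"),
--         ("framework-importability", "import"),
--     ]
--     for target, level in priorities:
--         if any(
--             str(item.get("id")) == target
--             and (item.get("status") or "").strip().lower() == "ok"
--             for item in checks
--         ):
--             return level
--     return "structural"
-- ===== Notes on version B (the rewrite author's own statement) =====
-- stated objective: alternative
-- what changed: B drops the ok-id set entirely: it walks the priority table [(id, level)] and re-scans the checks list per priority with any(), returning the first level whose id has an ok check, instead of A's build-a-set-then-three-membership-tests.
import Mathlib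
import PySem

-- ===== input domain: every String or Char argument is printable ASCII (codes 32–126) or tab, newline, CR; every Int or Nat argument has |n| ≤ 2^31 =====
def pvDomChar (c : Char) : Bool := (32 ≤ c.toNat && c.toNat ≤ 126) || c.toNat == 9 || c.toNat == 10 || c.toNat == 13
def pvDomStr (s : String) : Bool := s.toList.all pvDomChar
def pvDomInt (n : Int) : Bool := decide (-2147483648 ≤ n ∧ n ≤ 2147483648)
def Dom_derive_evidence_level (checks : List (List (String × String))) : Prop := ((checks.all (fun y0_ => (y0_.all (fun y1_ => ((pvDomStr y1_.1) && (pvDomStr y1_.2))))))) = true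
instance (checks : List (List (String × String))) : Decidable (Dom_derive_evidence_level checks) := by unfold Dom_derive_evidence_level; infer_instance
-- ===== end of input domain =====

-- B replaces A's build-a-set-of-ok-ids with a scan of the checks list per priority entry; alternative decomposition, same cost.

-- ===== PORT A =====
-- (item.get("status") or "") : a missing key and an empty string both yield ""
def pvStatusOkA (item : List (String × String)) : Bool :=
  PySem.Str.lower (PySem.Str.strip (((PySem.Dict.mk item).get? "status").getD "")) == "ok"

-- str(item.get("id")) : str of the string value, or "None" when the key is missing
def pvIdStrA (item : List (String × String)) : String :=
  match (PySem.Dict.mk item).get? "id" with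
  | some v => v
  | none => "None"

def derive_evidence_level (checks : List (List (String × String))) : String :=
  let ok_ids : PySem.Set String :=
    PySem.Set.ofList ((checks.filter pvStatusOkA).map pvIdStrA)
  if PySem.Set.contains ok_ids "task-smoke-executed" then "task_smoke"
  else if PySem.Set.contains ok_ids "framework-smoke-prerequisite" then "runtime_smoke"
  else if PySem.Set.contains ok_ids "framework-importability" then "import"
  else "structural"

-- ===== PORT B =====
def pvStatusOkB (item : List (String × String)) : Bool :=
  PySem.Str.lower (PySem.Str.strip (((PySem.Dict.mk item).get? "status").getD "")) == "ok"

def pvIdStrB (item : List (String × String)) : String :=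
  match (PySem.Dict.mk item).get? "id" with
  | some v => v
  | none => "None"

-- any(str(item.get("id")) == target and (item.get("status") or "").strip().lower() == "ok" for item in checks)
def pvHasOk (checks : List (List (String × String))) (target : String) : Bool :=
  checks.any (fun item => (pvIdStrB item == target) && pvStatusOkB item)

def derive_evidence_level_alt (checks : List (List (String × String))) : String :=
  let priorities : List (String × String) :=
    [("task-smoke-executed", "task_smoke"),
     ("framework-smoke-prerequisite", "runtime_smoke"),
     ("framework-importability", "import")]
  match priorities.find? (fun p => pvHasOk checks p.1) with
  | some p => p.2
  | none => "structural"

-- ===== PRECONDITION & SPEC =====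
def Spec_derive_evidence_level (checks : List (List (String × String))) (out : String) : Prop := out = derive_evidence_level_alt checks
instance (checks : List (List (String × String))) (out : String) : Decidable (Spec_derive_evidence_level checks out) := by unfold Spec_derive_evidence_level; infer_instance

-- ===== CLAIM (what is proved, stated in full; the proofs are below) =====
def Claim_equal_derive_evidence_level : Prop := ∀ (checks : List (List (String × String))), Dom_derive_evidence_level checks → Spec_derive_evidence_level checks (derive_evidence_level checks)

-- ===== LEMMAS AND PROOFS =====

-- membership in A's ok-id set coincides with B's per-target scan
theorem contains_okIds_eq_pvHasOk (checks : List (List (String × String))) (t : String) :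
    PySem.Set.contains (PySem.Set.ofList ((checks.filter pvStatusOkA).map pvIdStrA)) t
      = pvHasOk checks t := by
  have : pvStatusOkB = pvStatusOkA := rfl
  have hid : pvIdStrB = pvIdStrA := rfl
  simp only [pvHasOk, this, hid]
  rw [Bool.eq_iff_iff]
  simp only [PySem.Set.contains_iff, PySem.Set.mem_ofList, List.mem_map, List.mem_filter,
    List.any_eq_true, Bool.and_eq_true, beq_iff_eq]
  constructor
  · rintro ⟨item, ⟨hin, hok⟩, hrfl⟩
    exact ⟨item, hin, hrfl, hok⟩
  · rintro ⟨item, hin, hrfl, hok⟩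
    exact ⟨item, ⟨hin, hok⟩, hrfl⟩

-- ===== VERDICT (by name: the statement is the Claim_ definition above) =====
theorem derive_evidence_level_spec : Claim_equal_derive_evidence_level := by
  intro checks _
  unfold Spec_derive_evidence_level derive_evidence_level derive_evidence_level_alt
  simp only [contains_okIds_eq_pvHasOk, List.find?]
  cases h1 : pvHasOk checks "task-smoke-executed" <;>
    cases h2 : pvHasOk checks "framework-smoke-prerequisite" <;>
      cases h3 : pvHasOk checks "framework-importability" <;> simp [h1]
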